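-- pv_equiv track=rewrite | github.com/helenamich/Projekty | EF1-kontakty/merge_all_deals_v2.py | get_best_email
-- ===== SOURCE A (Python) =====
-- def get_best_email(emails):
--     for e in emails:
--         if e and '@' in e:
--             if not any(x in e.lower() for x in ['gmail', 'seznam', 'email.cz', 'centrum.cz']):
--                 return e.strip()
--     for e in emails:
--         if e and '@' in e:
--             return e.strip()
--     return ""
-- ===== SOURCE B (Python) =====
-- def get_best_email(emails):
--     fallback = None
--     for e in emails:
--         if e and '@' in e:
--             low = e.lower()
--             if 'gmail' in low or 'seznam' in low or 'email.cz' in low or 'centrum.cz' in low: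
--                 if fallback is None:
--                     fallback = e
--             else:
--                 return e.strip()
--     return fallback.strip() if fallback is not None else ""
-- ===== Notes on version B (the rewrite author's own statement) =====
-- stated objective: alternative
-- what changed: Replaces A's two sequential scans with one single pass that returns the first non-freemail valid email immediately and keeps the first valid email as a fallback.
import Mathlib
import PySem

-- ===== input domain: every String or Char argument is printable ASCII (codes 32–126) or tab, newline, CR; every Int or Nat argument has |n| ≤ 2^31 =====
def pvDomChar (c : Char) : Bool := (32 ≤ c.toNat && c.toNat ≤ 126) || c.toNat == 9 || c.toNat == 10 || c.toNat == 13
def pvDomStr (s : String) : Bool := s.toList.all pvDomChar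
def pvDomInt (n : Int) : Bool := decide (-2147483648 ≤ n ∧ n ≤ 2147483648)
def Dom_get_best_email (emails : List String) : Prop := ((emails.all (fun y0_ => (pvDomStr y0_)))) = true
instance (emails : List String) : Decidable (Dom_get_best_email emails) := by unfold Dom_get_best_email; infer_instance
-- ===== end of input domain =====

-- B replaces A's two sequential scans with one single pass keeping the first valid email as fallback (same O(n) cost, one traversal).

-- ===== PORT A =====
-- 'e and "@" in e'
def pvAValid (e : String) : Bool := !(e == "") && PySem.Str.isIn "@" e

-- 'any(x in e.lower() for x in [...])'
def pvAFree (e : String) : Bool :=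
  (["gmail", "seznam", "email.cz", "centrum.cz"] : List String).any
    (fun x => PySem.Str.isIn x (PySem.Str.lower e))

-- first loop: first valid non-freemail email, stripped
def pvALoop1 : List String → Option String
  | [] => none
  | e :: rest =>
    if pvAValid e then
      if !pvAFree e then some (PySem.Str.strip e) else pvALoop1 rest
    else pvALoop1 rest

-- second loop: first valid email, stripped
def pvALoop2 : List String → Option String
  | [] => none
  | e :: rest => if pvAValid e then some (PySem.Str.strip e) else pvALoop2 rest

def get_best_email (emails : List String) : String :=
  match pvALoop1 emails with
  | some s => s
  | none =>
    match pvALoop2 emails with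
    | some s => s
    | none => ""

-- ===== PORT B =====
-- single pass carrying the first valid email seen so far as fallback
def pvBLoop : List String → Option String → String
  | [], fallback =>
    match fallback with
    | some f => PySem.Str.strip f
    | none => ""
  | e :: rest, fallback =>
    if !(e == "") && PySem.Str.isIn "@" e then
      if PySem.Str.isIn "gmail" (PySem.Str.lower e)
          || PySem.Str.isIn "seznam" (PySem.Str.lower e)
          || PySem.Str.isIn "email.cz" (PySem.Str.lower e)
          || PySem.Str.isIn "centrum.cz" (PySem.Str.lower e) then
        pvBLoop rest (if fallback.isNone then some e else fallback)
      else PySem.Str.strip e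
    else pvBLoop rest fallback

def get_best_email_alt (emails : List String) : String :=
  pvBLoop emails none

-- ===== PRECONDITION & SPEC =====
def Spec_get_best_email (emails : List String) (out : String) : Prop := out = get_best_email_alt emails
instance (emails : List String) (out : String) : Decidable (Spec_get_best_email emails out) := by unfold Spec_get_best_email; infer_instance

-- ===== CLAIM (what is proved, stated in full; the proofs are below) =====
def Claim_equal_get_best_email : Prop := ∀ (emails : List String), Dom_get_best_email emails → Spec_get_best_email emails (get_best_email emails)

-- ===== LEMMAS AND PROOFS =====

-- invariant: pvBLoop with fallback fb equals A's combined answer, with fb taking priority over A's second loop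
theorem pvBLoop_inv (l : List String) (fb : Option String) :
    pvBLoop l fb =
      match pvALoop1 l with
      | some s => s
      | none =>
        match fb with
        | some f => PySem.Str.strip f
        | none => match pvALoop2 l with | some s => s | none => "" := by
  induction l generalizing fb with
  | nil => simp [pvBLoop, pvALoop1, pvALoop2]
  | cons e rest ih =>
    by_cases hv : pvAValid e
    · by_cases hf : pvAFree e
      · have : (PySem.Str.isIn "gmail" (PySem.Str.lower e)
            || PySem.Str.isIn "seznam" (PySem.Str.lower e)
            || PySem.Str.isIn "email.cz" (PySem.Str.lower e)
            || PySem.Str.isIn "centrum.cz" (PySem.Str.lower e)) = true := by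
          simpa [pvAFree, List.any, Bool.or_assoc] using hf
        simp only [pvBLoop, pvALoop1, pvALoop2, pvAValid] at *
        rw [if_pos hv, if_pos this, if_pos hv, if_pos hv, ih]
        cases fb <;> simp [hf]
      · have : (PySem.Str.isIn "gmail" (PySem.Str.lower e)
            || PySem.Str.isIn "seznam" (PySem.Str.lower e)
            || PySem.Str.isIn "email.cz" (PySem.Str.lower e)
            || PySem.Str.isIn "centrum.cz" (PySem.Str.lower e)) = false := by
          simpa [pvAFree, List.any, Bool.or_assoc] using hf
        simp only [pvBLoop, pvALoop1, pvAValid] at *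
        rw [if_pos hv, if_neg (by rw [this]; simp), if_pos hv, if_pos (by simp [hf])]
    · simp only [pvBLoop, pvALoop1, pvALoop2, pvAValid] at *
      rw [if_neg hv, if_neg hv, if_neg hv, ih]

-- ===== VERDICT =====
theorem get_best_email_spec : Claim_equal_get_best_email := by
  intro emails _
  unfold Spec_get_best_email get_best_email get_best_email_alt
  rw [pvBLoop_inv]
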